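-- pv_equiv track=rewrite | github.com/lnyxzdevk/boostcamp8_algorithm | Programmers/표현 가능한 이진트리/표현 가능한 이진트리_lhJoon.py | make_tree_size
-- ===== SOURCE A (Python) =====
-- def make_tree_size(tree_size,str_num):
--     if tree_size > len(str_num):
--         str_num = '0'* (tree_size-len(str_num)) + str_num
--         return str_num
--     elif tree_size == len(str_num):
--         return str_num
--     else:
--         return make_tree_size(((tree_size+1)*2-1),str_num)
-- ===== SOURCE B (Python) =====
-- def make_tree_size(tree_size, str_num):
--     n = len(str_num)
--     while tree_size < n:
--         tree_size = 2 * tree_size + 1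
--     return '0' * (tree_size - n) + str_num
-- ===== Notes on version B (the rewrite author's own statement) =====
-- stated objective: simpler
-- what changed: Replaces the three-branch tail recursion by an iterative while loop maintaining the single running tree_size, with one unconditional pad at the end (padding zero characters is a no-op, merging A's '>' and '==' branches).
import Mathlib
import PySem

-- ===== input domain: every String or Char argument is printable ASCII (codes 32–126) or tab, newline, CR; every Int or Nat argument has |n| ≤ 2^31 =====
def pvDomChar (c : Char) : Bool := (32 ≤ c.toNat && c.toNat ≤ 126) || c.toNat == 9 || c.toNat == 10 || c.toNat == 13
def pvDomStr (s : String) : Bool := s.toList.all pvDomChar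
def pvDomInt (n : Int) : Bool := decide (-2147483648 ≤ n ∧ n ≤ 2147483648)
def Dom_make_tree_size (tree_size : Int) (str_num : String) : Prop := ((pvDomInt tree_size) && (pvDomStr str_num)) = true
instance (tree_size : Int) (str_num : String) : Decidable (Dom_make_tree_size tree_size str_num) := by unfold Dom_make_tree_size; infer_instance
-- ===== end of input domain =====

-- B replaces A's three-branch tail recursion by a while loop over the same recurrence
-- t -> 2t+1 followed by one unconditional pad (objective: simpler).

-- ===== PORT A =====
-- Fuel makes the recursion total in Lean; within Pre_ (0 ≤ tree_size) the fuel
-- str_num.length + 1 is never exhausted, so the port is exact there.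
-- '0' * k + str_num is ported as replicate k.toNat '0' ++ toList (exact: k > 0 in that branch).
def make_tree_size_go (fuel : Nat) (tree_size : Int) (str_num : String) : String :=
  match fuel with
  | 0 => str_num
  | fuel + 1 =>
    if tree_size > PySem.Str.len str_num then
      String.ofList (List.replicate (tree_size - PySem.Str.len str_num).toNat '0' ++ str_num.toList)
    else if tree_size = PySem.Str.len str_num then
      str_num
    else
      make_tree_size_go fuel ((tree_size + 1) * 2 - 1) str_num

def make_tree_size (tree_size : Int) (str_num : String) : String :=
  make_tree_size_go (str_num.toList.length + 1) tree_size str_num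

-- ===== PORT B =====
-- the while loop: while tree_size < n: tree_size = 2*tree_size + 1  (fuel as above)
def tree_loop (fuel : Nat) (t : Int) (n : Int) : Int :=
  match fuel with
  | 0 => t
  | fuel + 1 => if t < n then tree_loop fuel (2 * t + 1) n else t

def make_tree_size_alt (tree_size : Int) (str_num : String) : String :=
  let n := PySem.Str.len str_num
  let t := tree_loop (str_num.toList.length + 1) tree_size n
  String.ofList (List.replicate (t - n).toNat '0' ++ str_num.toList)

-- ===== PRECONDITION & SPEC =====
-- Pre_ excludes tree_size < 0, on which the Python A recurses forever (RecursionError).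
def Pre_make_tree_size (tree_size : Int) (str_num : String) : Prop := 0 ≤ tree_size
instance (tree_size : Int) (str_num : String) : Decidable (Pre_make_tree_size tree_size str_num) := by
  unfold Pre_make_tree_size; infer_instance

def pvWitness_make_tree_size : Int × String := (1, "101")

def Spec_make_tree_size (tree_size : Int) (str_num : String) (out : String) : Prop :=
  out = make_tree_size_alt tree_size str_num
instance (tree_size : Int) (str_num : String) (out : String) : Decidable (Spec_make_tree_size tree_size str_num out) := by
  unfold Spec_make_tree_size; infer_instance

-- ===== CLAIM (what is proved, stated in full; the proofs are below) =====
def Claim_equal_make_tree_size : Prop := ∀ (tree_size : Int) (str_num : String), Dom_make_tree_size tree_size str_num → Pre_make_tree_size tree_size str_num → Spec_make_tree_size tree_size str_num (make_tree_size tree_size str_num)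

-- ===== LEMMAS AND PROOFS =====

-- A's recursive body agrees with B's loop-then-pad, given enough fuel.
theorem go_eq_loop_pad (fuel : Nat) (t : Int) (s : String) (ht : 0 ≤ t)
    (hfuel : PySem.Str.len s + 1 ≤ 2 ^ fuel * (t + 1)) :
    make_tree_size_go (fuel + 1) t s =
      String.ofList (List.replicate (tree_loop (fuel + 1) t (PySem.Str.len s) - PySem.Str.len s).toNat '0' ++ s.toList) := by
  induction fuel generalizing t with
  | zero =>
    simp only [pow_zero, one_mul] at hfuel
    have hle : PySem.Str.len s ≤ t := by omega
    simp only [make_tree_size_go, tree_loop]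
    rcases lt_or_eq_of_le hle with h | h
    · rw [if_pos h, if_neg (by omega)]
    · rw [if_neg (by omega), if_pos h.symm, if_neg (by omega)]
      rw [show (t - PySem.Str.len s).toNat = 0 from by omega]
      simp
  | succ fuel ih =>
    by_cases hlt : t < PySem.Str.len s
    · have hstep : make_tree_size_go (fuel + 1 + 1) t s = make_tree_size_go (fuel + 1) (2 * t + 1) s := by
        conv_lhs => rw [make_tree_size_go]
        rw [if_neg (by omega), if_neg (by omega), show (t + 1) * 2 - 1 = 2 * t + 1 from by ring]
      have hloop : tree_loop (fuel + 1 + 1) t (PySem.Str.len s) = tree_loop (fuel + 1) (2 * t + 1) (PySem.Str.len s) := by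
        simp only [tree_loop]; rw [if_pos hlt]
      rw [hstep, hloop]
      apply ih (2 * t + 1) (by omega)
      have : (2 : Int) ^ (fuel + 1) * (t + 1) = 2 ^ fuel * (2 * t + 1 + 1) := by ring
      omega
    · rw [Int.not_lt] at hlt
      simp only [make_tree_size_go, tree_loop]
      rcases lt_or_eq_of_le hlt with h | h
      · rw [if_pos h, if_neg (by omega)]
      · rw [if_neg (by omega), if_pos h.symm, if_neg (by omega)]
        rw [show (t - PySem.Str.len s).toNat = 0 from by omega]
        simp

theorem len_lt_two_pow (n : Nat) : (n : Int) + 1 ≤ 2 ^ n := by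
  have := Nat.lt_two_pow_self (n := n)
  have : (n : Int) < 2 ^ n := by exact_mod_cast this
  omega

-- ===== VERDICT (by name: the statement is the Claim_ definition above) =====
theorem make_tree_size_spec : Claim_equal_make_tree_size := by
  intro t s _ hpre
  have ht : 0 ≤ t := hpre
  unfold Spec_make_tree_size make_tree_size make_tree_size_alt
  have hlen : PySem.Str.len s = (s.toList.length : Int) := by
    simp [PySem.Str.len_eq]
  apply go_eq_loop_pad _ _ _ ht
  have h1 := len_lt_two_pow s.toList.length
  have h2 : (1 : Int) ≤ t + 1 := by omega
  have h3 : (0 : Int) < 2 ^ s.toList.length := by positivity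
  calc PySem.Str.len s + 1 = (s.toList.length : Int) + 1 := by rw [hlen]
    _ ≤ 2 ^ s.toList.length := h1
    _ = 2 ^ s.toList.length * 1 := by ring
    _ ≤ 2 ^ s.toList.length * (t + 1) := by
        exact mul_le_mul_of_nonneg_left h2 (le_of_lt h3)
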